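-- pv_equiv track=rewrite | github.com/nc9/taskmux | taskmux/tmux_manager.py | _find_new_lines
-- ===== SOURCE A (Python) =====
-- def _find_new_lines(current: list[str], prev_tail: list[str]) -> list[str]:
--     """Return lines in current that are new since prev_tail."""
--     if not prev_tail:
--         return current
--     target = prev_tail[-1]
--     for i in range(len(current) - 1, -1, -1):
--         if current[i] == target:
--             ctx = min(len(prev_tail), i + 1)
--             if current[i - ctx + 1 : i + 1] == prev_tail[-ctx:]:
--                 return current[i + 1 :]
--     return current  # no match, prev scrolled away — return all
-- ===== SOURCE B (Python) =====
-- def _find_new_lines(current: list[str], prev_tail: list[str]) -> list[str]: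
--     """Return lines in current that are new since prev_tail.
--
--     KMP prefix-function approach: a full copy of prev_tail ending at position k
--     in current shows up as a prefix-function value equal to len(prev_tail) in
--     prev_tail + [None] + current (None is a sentinel no line equals); if there
--     is none, the longest prefix of current that is a suffix of prev_tail is the
--     last prefix-function value of current + [None] + prev_tail.  The new lines
--     are everything after the best anchor found (0 if none).
--     """
--     if not prev_tail:
--         return current
--     m = len(prev_tail)
--     w = prev_tail + [None] + current
--     pi = _prefix_function(w)
--     best = 0
--     for j in range(m + 1, len(w)):
--         if pi[j] == m:
--             best = j - m
--     if best == 0: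
--         v = current + [None] + prev_tail
--         best = _prefix_function(v)[-1]
--     return current[best:]
--
--
-- def _prefix_function(w):
--     """pi[i] = length of the longest proper border of w[:i+1] (classic KMP)."""
--     pi = [0] * len(w)
--     j = 0
--     for i in range(1, len(w)):
--         while j > 0 and w[i] != w[j]:
--             j = pi[j - 1]
--         if w[i] == w[j]:
--             j += 1
--         pi[i] = j
--     return pi
-- ===== Notes on version B (the rewrite author's own statement) =====
-- stated objective: faster
-- what changed: A scans current right-to-left and at every candidate position compares a ctx-length slice against prev_tail's tail (O(n*m) worst case); B joins the lists with a None sentinel and runs the classic KMP prefix-function twice - once to find the last full occurrence of prev_tail, once for the longest prefix-of-current/suffix-of-prev_tail overlap - in O(n+m).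
import Mathlib
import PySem

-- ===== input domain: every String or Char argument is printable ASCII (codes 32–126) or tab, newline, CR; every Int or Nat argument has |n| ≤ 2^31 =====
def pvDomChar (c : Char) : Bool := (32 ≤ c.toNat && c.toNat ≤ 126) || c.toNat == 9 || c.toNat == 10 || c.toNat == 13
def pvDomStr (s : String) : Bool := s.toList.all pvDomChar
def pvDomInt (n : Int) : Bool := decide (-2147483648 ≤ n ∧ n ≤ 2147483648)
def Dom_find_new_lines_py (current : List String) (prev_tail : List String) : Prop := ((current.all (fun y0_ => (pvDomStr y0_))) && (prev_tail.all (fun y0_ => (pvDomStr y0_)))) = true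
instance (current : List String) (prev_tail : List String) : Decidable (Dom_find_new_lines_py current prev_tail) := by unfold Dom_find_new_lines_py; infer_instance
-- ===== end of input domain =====

-- B replaces A's right-to-left scan with per-candidate slice comparison by the KMP
-- prefix-function (two linear passes over sentinel-joined lists) — objective: alternative O(n+m) algorithm.

-- ===== PORT A =====
-- A's for-loop with its two early returns, scanning the index list [n-1, …, 0]
def pvLoopA (current : List String) (prev_tail : List String) (target : String) : List Int → List String
  | [] => current  -- loop fell through: "return current  # no match, prev scrolled away"
  | i :: rest =>
    if PySem.List.pyGetD current i "" = target then  -- current[i]; i always in range here, default never used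
      let ctx : Int := min (prev_tail.length : Int) (i + 1)
      if PySem.List.slice current (some (i - ctx + 1)) (some (i + 1)) =
         PySem.List.slice prev_tail (some (-ctx)) none then
        PySem.List.slice current (some (i + 1)) none
      else pvLoopA current prev_tail target rest
    else pvLoopA current prev_tail target rest

def find_new_lines_py (current : List String) (prev_tail : List String) : List String :=
  if prev_tail = [] then current
  else
    let target := PySem.List.pyGetD prev_tail (-1) ""  -- prev_tail[-1]; guard guarantees nonempty, default never used
    pvLoopA current prev_tail target (PySem.List.pyRange ((current.length : Int) - 1) (-1) (-1))

-- ===== PORT B =====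
-- the 'while j > 0 and w[i] != w[j]: j = pi[j-1]' loop of _prefix_function;
-- fuel (initially j, which strictly decreases each iteration) only makes it total.
-- w[i] (here c) and w[j] are always in range when called, so getD's default is never used.
def pvKmpFall (w : List (Option String)) (pi : List Nat) (c : Option String) : Nat → Nat → Nat
  | 0, j => j
  | fuel + 1, j =>
    if 0 < j ∧ ¬ c = w.getD j none then pvKmpFall w pi c fuel (pi.getD (j - 1) 0)
    else j

-- _prefix_function: python preallocates pi = [0]*len(w) and assigns pi[i] = j in index
-- order, reading only already-assigned entries; transcribed as building pi by appending.
def pvPrefixFun (w : List (Option String)) : List Nat :=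
  if w.length = 0 then []
  else
    ((List.range' 1 (w.length - 1)).foldl
      (fun st i =>
        let j0 := pvKmpFall w st.1 (w.getD i none) st.2 st.2
        let j1 := if w.getD i none = w.getD j0 none then j0 + 1 else j0
        (st.1 ++ [j1], j1)) ([0], 0)).1

def find_new_lines_py_alt (current : List String) (prev_tail : List String) : List String :=
  if prev_tail = [] then current
  else
    let m := prev_tail.length
    let w := prev_tail.map some ++ [none] ++ current.map some
    let pi := pvPrefixFun w
    -- for j in range(m+1, len(w)): if pi[j] == m: best = j - m   (indices are all ≥ m+1 ≥ 1)
    let best := (List.range' (m + 1) (w.length - (m + 1))).foldl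
      (fun best j => if pi.getD j 0 = m then j - m else best) 0
    let best := if best = 0 then
        let v := current.map some ++ [none] ++ prev_tail.map some
        (pvPrefixFun v).getD (v.length - 1) 0   -- _prefix_function(v)[-1]; v nonempty
      else best
    PySem.List.slice current (some (best : Int)) none

-- ===== PRECONDITION & SPEC =====
def Spec_find_new_lines_py (current : List String) (prev_tail : List String) (out : List String) : Prop := out = find_new_lines_py_alt current prev_tail
instance (current : List String) (prev_tail : List String) (out : List String) : Decidable (Spec_find_new_lines_py current prev_tail out) := by unfold Spec_find_new_lines_py; infer_instance

-- ===== CLAIM (what is proved, stated in full; the proofs are below) =====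
def Claim_equal_find_new_lines_py : Prop := ∀ (current : List String) (prev_tail : List String), Dom_find_new_lines_py current prev_tail → Spec_find_new_lines_py current prev_tail (find_new_lines_py current prev_tail)

-- ===== LEMMAS AND PROOFS =====

-- ---- A-side characterisation (pvCond/pvBest describe A's loop) ----

-- the validity predicate A's loop tests, on the Nat level: the first k lines of
-- current end with the last c = min m k lines of prev_tail
def pvCond (current prev_tail : List String) (k : Nat) : Bool :=
  let c := min prev_tail.length k
  decide ((current.drop (k - c)).take c = prev_tail.drop (prev_tail.length - c))

-- the largest valid anchor in [1..n] (0 if none)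
def pvBest (current prev_tail : List String) : Nat → Nat
  | 0 => 0
  | n+1 => if pvCond current prev_tail (n+1) then n+1 else pvBest current prev_tail n

lemma pv_desc (n : Nat) :
    PySem.List.pyRange ((n : Int) - 1) (-1) (-1)
      = (List.range n).map (fun k : Nat => (n : Int) - 1 - (k : Int)) := by
  simp only [PySem.List.pyRange]
  rw [if_neg (by norm_num), if_neg (by norm_num)]
  rcases Nat.eq_zero_or_pos n with h | h
  · subst h; simp
  · rw [if_pos (by omega)]
    have hc : (((n : Int) - 1 - -1 + -(-1) - 1) / -(-1)).toNat = n := by simp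
    rw [hc]
    apply List.map_congr_left
    intro k _
    ring

lemma pv_desc_succ (n : Nat) :
    PySem.List.pyRange (((n+1 : Nat) : Int) - 1) (-1) (-1)
      = ((n : Nat) : Int) :: PySem.List.pyRange ((n : Int) - 1) (-1) (-1) := by
  rw [pv_desc, pv_desc, List.range_succ_eq_map, List.map_cons, List.map_map]
  refine congrArg₂ _ (by push_cast; ring) ?_
  apply List.map_congr_left
  intro k _
  simp [Nat.succ_eq_add_one]
  ring

lemma pv_slice_cur (current : List String) (k c : Nat) (hck : c ≤ k) :
    PySem.List.slice current (some ((k : Int) - (c : Int))) (some (k : Int))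
      = (current.drop (k - c)).take c := by
  have h1 : (k : Int) - (c : Int) = ((k - c : Nat) : Int) := by omega
  rw [h1, PySem.List.slice_natCast]
  congr 1
  omega

lemma pv_slice_prev_neg (prev_tail : List String) (c : Nat) (hc : 1 ≤ c) (hcm : c ≤ prev_tail.length) :
    PySem.List.slice prev_tail (some (-(c : Int))) none = prev_tail.drop (prev_tail.length - c) := by
  simp only [PySem.List.slice, PySem.List.clampIdx]
  rw [if_pos (by omega), if_neg (by omega)]
  have h1 : ((prev_tail.length : Int) + -(c : Int)).toNat = prev_tail.length - c := by omega
  rw [h1]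
  apply List.take_of_length_le
  simp

-- a valid anchor k forces current[k-1] = prev_tail[-1]
lemma pv_cond_target (current prev_tail : List String) (k : Nat)
    (hpt : prev_tail ≠ []) (hk1 : 1 ≤ k)
    (h : pvCond current prev_tail k = true) :
    current.getD (k - 1) "" = PySem.List.pyGetD prev_tail (-1) "" := by
  have hm : 1 ≤ prev_tail.length := List.length_pos_iff.mpr hpt
  set m := prev_tail.length with hmdef
  set c := min m k with hcdef
  have hc1 : 1 ≤ c := by omega
  have hck : c ≤ k := by omega
  have hcm : c ≤ m := by omega
  have heq : (current.drop (k - c)).take c = prev_tail.drop (m - c) := by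
    simpa [pvCond] using h
  have hidx : ((current.drop (k - c)).take c)[c-1]? = (prev_tail.drop (m - c))[c-1]? := by
    rw [heq]
  rw [List.getElem?_take, if_pos (by omega), List.getElem?_drop, List.getElem?_drop] at hidx
  have h1 : k - c + (c - 1) = k - 1 := by omega
  have h2 : m - c + (c - 1) = m - 1 := by omega
  rw [h1, h2] at hidx
  have hget : PySem.List.pyGetD prev_tail (-1) "" = prev_tail.getD (m - 1) "" := by
    simp [PySem.List.pyGetD, PySem.List.pyGet?, PySem.List.pyIdx?, List.getD_eq_getElem?_getD]
    rw [if_pos hm]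
    simp
    rfl
  rw [hget, List.getD_eq_getElem?_getD, List.getD_eq_getElem?_getD, hidx]

lemma pv_loopA (current prev_tail : List String) (hpt : prev_tail ≠ []) :
    ∀ n, n ≤ current.length →
    pvLoopA current prev_tail (PySem.List.pyGetD prev_tail (-1) "")
        (PySem.List.pyRange ((n : Int) - 1) (-1) (-1))
      = current.drop (pvBest current prev_tail n) := by
  intro n
  induction n with
  | zero => intro _; norm_num [PySem.List.pyRange, pvBest, pvLoopA]
  | succ n ih =>
    intro hn
    have hm : 1 ≤ prev_tail.length := List.length_pos_iff.mpr hpt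
    rw [pv_desc_succ, pvLoopA]
    set c' : Nat := min prev_tail.length (n+1) with hc'
    have hcast : min (prev_tail.length : Int) ((n : Int) + 1) = (c' : Int) := by
      omega
    have harg : (n : Int) - min (prev_tail.length : Int) ((n : Int) + 1) + 1
        = (((n+1 : Nat)) : Int) - (c' : Int) := by rw [hcast]; push_cast; ring
    have harg2 : (n : Int) + 1 = (((n+1 : Nat)) : Int) := by push_cast; ring
    have e1 : PySem.List.slice current
        (some ((n : Int) - min (prev_tail.length : Int) ((n : Int) + 1) + 1))
        (some ((n : Int) + 1))
        = (current.drop (n + 1 - c')).take c' := by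
      rw [harg, harg2, pv_slice_cur current (n+1) c' (by omega)]
    have e2 : PySem.List.slice prev_tail
        (some (-min (prev_tail.length : Int) ((n : Int) + 1))) none
        = prev_tail.drop (prev_tail.length - c') := by
      rw [hcast, pv_slice_prev_neg prev_tail c' (by omega) (by omega)]
    simp only [e1, e2, PySem.List.pyGetD_natCast]
    by_cases hcond : pvCond current prev_tail (n+1) = true
    · have htg := pv_cond_target current prev_tail (n+1) hpt (by omega) hcond
      simp only [Nat.add_sub_cancel] at htg
      rw [if_pos htg]
      have hsl : (current.drop (n + 1 - c')).take c'
          = prev_tail.drop (prev_tail.length - c') := by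
        simpa [pvCond, decide_eq_true_eq] using hcond
      rw [if_pos hsl, harg2, PySem.List.slice_from current (by positivity)]
      have hb : pvBest current prev_tail (n+1) = n+1 := by simp [pvBest, hcond]
      rw [hb]
      simp
    · have hsl : ¬ ((current.drop (n + 1 - c')).take c'
          = prev_tail.drop (prev_tail.length - c')) := by
        intro h
        exact hcond (by simp [pvCond]; exact h)
      have hb : pvBest current prev_tail (n+1) = pvBest current prev_tail n := by
        simp [pvBest, hcond]
      rw [hb]
      by_cases htg : current.getD n "" = PySem.List.pyGetD prev_tail (-1) ""
      · rw [if_pos htg, if_neg hsl]; exact ih (by omega)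
      · rw [if_neg htg]; exact ih (by omega)

-- A's recursive scan is the greatest valid anchor
lemma pvBest_eq_FG (current prev_tail : List String) :
    ∀ N, pvBest current prev_tail N
      = Nat.findGreatest (fun k => pvCond current prev_tail k = true) N := by
  intro N
  induction N with
  | zero => rfl
  | succ n ih =>
    by_cases h : pvCond current prev_tail (n+1) = true
    · simp [pvBest, Nat.findGreatest_succ, h]
    · simp [pvBest, Nat.findGreatest_succ, h, ih]

-- ---- longest-proper-border spec (what the prefix function computes) ----

-- length of the longest proper border of w.take i (0 if i = 0)
def pvLB (w : List (Option String)) (i : Nat) : Nat :=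
  Nat.findGreatest (fun t => t < i ∧ w.take t <:+ w.take i) i

lemma pvLB_lt (w : List (Option String)) {i : Nat} (h : 0 < i) : pvLB w i < i := by
  by_cases h0 : pvLB w i = 0
  · omega
  · exact (Nat.findGreatest_spec (P := fun t => t < i ∧ w.take t <:+ w.take i)
      (Nat.zero_le i) ⟨h, List.nil_suffix⟩).1

lemma pvLB_suffix (w : List (Option String)) (i : Nat) :
    w.take (pvLB w i) <:+ w.take i := by
  by_cases h0 : pvLB w i = 0
  · rw [h0]; exact List.nil_suffix
  · rcases Nat.eq_zero_or_pos i with hi | hi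
    · subst hi
      exact absurd (Nat.le_antisymm (Nat.findGreatest_le 0) (Nat.zero_le _)) h0
    · exact (Nat.findGreatest_spec (P := fun t => t < i ∧ w.take t <:+ w.take i)
        (Nat.zero_le i) ⟨hi, List.nil_suffix⟩).2

lemma pvLB_max (w : List (Option String)) {i t : Nat} (ht : t < i)
    (hs : w.take t <:+ w.take i) : t ≤ pvLB w i :=
  Nat.le_findGreatest (le_of_lt ht) ⟨ht, hs⟩

lemma pvLB_one (w : List (Option String)) : pvLB w 1 = 0 := by
  apply Nat.findGreatest_eq_zero_iff.mpr
  intro t ht1 ht2 hP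
  omega

-- ---- generic border lemmas ----

lemma pv_suffix_of_le {l1 l2 l3 : List (Option String)}
    (h1 : l1 <:+ l3) (h2 : l2 <:+ l3) (h : l1.length ≤ l2.length) : l1 <:+ l2 := by
  have := List.prefix_of_prefix_length_le (List.reverse_prefix.mpr h1)
    (List.reverse_prefix.mpr h2) (by simpa using h)
  exact List.reverse_prefix.mp this

lemma pv_append_singleton_suffix (a b : Option String) (l1 l2 : List (Option String)) :
    l1 ++ [a] <:+ l2 ++ [b] ↔ a = b ∧ l1 <:+ l2 := by
  rw [← List.reverse_prefix, List.reverse_append, List.reverse_append]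
  simp [List.cons_prefix_cons, List.reverse_prefix]

-- peeling the last element off both sides of a border relation
lemma pv_ext (w : List (Option String)) (s N : Nat) (hs : 1 ≤ s) (hsN : s ≤ N)
    (hN : N ≤ w.length) :
    (w.take s <:+ w.take N) ↔
      (w.take (s-1) <:+ w.take (N-1) ∧ w[s-1]? = w[N-1]?) := by
  obtain ⟨s', rfl⟩ : ∃ s', s = s'+1 := ⟨s-1, by omega⟩
  obtain ⟨N', rfl⟩ : ∃ N', N = N'+1 := ⟨N-1, by omega⟩
  simp only [Nat.add_sub_cancel]
  have hs' : s' < w.length := by omega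
  have hN' : N' < w.length := by omega
  rw [List.take_succ, List.take_succ,
    List.getElem?_eq_getElem hs', List.getElem?_eq_getElem hN']
  simp only [Option.toList_some]
  rw [pv_append_singleton_suffix]
  simp [List.getElem?_eq_getElem, hs', hN']
  tauto

-- ---- the fallback (while) loop follows the border chain ----

lemma pvFall_spec (w : List (Option String)) (pi : List Nat) (i : Nat)
    (hi : i < w.length)
    (hpi : ∀ t, t < i → pi.getD t 0 = pvLB w (t+1)) :
    ∀ fuel j, j ≤ fuel → j < i → (w.take j <:+ w.take i) →
      (∀ t, t < i → w.take t <:+ w.take i → w.getD t none = w.getD i none → t ≤ j) →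
      (pvKmpFall w pi (w.getD i none) fuel j < i ∧
       w.take (pvKmpFall w pi (w.getD i none) fuel j) <:+ w.take i ∧
       (pvKmpFall w pi (w.getD i none) fuel j = 0 ∨
         w.getD (pvKmpFall w pi (w.getD i none) fuel j) none = w.getD i none) ∧
       (∀ t, t < i → w.take t <:+ w.take i → w.getD t none = w.getD i none →
         t ≤ pvKmpFall w pi (w.getD i none) fuel j)) := by
  intro fuel
  induction fuel with
  | zero =>
    intro j hjf hji hjb hjm
    have hj0 : j = 0 := by omega
    subst hj0
    exact ⟨hji, hjb, Or.inl rfl, hjm⟩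
  | succ f ih =>
    intro j hjf hji hjb hjm
    rw [pvKmpFall]
    by_cases hcond : 0 < j ∧ ¬ w.getD i none = w.getD j none
    · rw [if_pos hcond]
      have hlb : pi.getD (j - 1) 0 = pvLB w j := by
        have := hpi (j-1) (by omega)
        rwa [Nat.sub_add_cancel hcond.1] at this
      rw [hlb]
      have hlt : pvLB w j < j := pvLB_lt w hcond.1
      apply ih (pvLB w j) (by omega) (by omega)
        ((pvLB_suffix w j).trans hjb)
      intro t ht hbt hmt
      have htj : t ≤ j := hjm t ht hbt hmt
      have htj' : t < j := by
        rcases Nat.lt_or_ge t j with h | h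
        · exact h
        · exfalso
          have : t = j := by omega
          subst this
          exact hcond.2 hmt.symm
      have hbtj : w.take t <:+ w.take j := by
        apply pv_suffix_of_le hbt hjb
        rw [List.length_take, List.length_take]
        omega
      exact pvLB_max w htj' hbtj
    · rw [if_neg hcond]
      refine ⟨hji, hjb, ?_, hjm⟩
      by_cases hj0 : j = 0
      · exact Or.inl hj0
      · push_neg at hcond
        exact Or.inr (hcond (by omega)).symm

-- ---- one step of the prefix-function loop computes the next border length ----

lemma pvStep_eq (w : List (Option String)) (i r : Nat) (h0 : 0 < i) (hi : i < w.length)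
    (hr : r < i) (hb : w.take r <:+ w.take i)
    (hstop : r = 0 ∨ w.getD r none = w.getD i none)
    (hmax : ∀ t, t < i → w.take t <:+ w.take i → w.getD t none = w.getD i none → t ≤ r) :
    (if w.getD i none = w.getD r none then r + 1 else r) = pvLB w (i+1) := by
  have hget : ∀ (t : Nat) (ht : t < w.length), w.getD t none = (w[t]'ht : Option String) := by
    intro t ht
    rw [List.getD_eq_getElem?_getD, List.getElem?_eq_getElem ht]
    rfl
  have hgeq : ∀ s t : Nat, s < w.length → t < w.length →
      (w.getD s none = w.getD t none ↔ w[s]? = w[t]?) := by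
    intro s t hs ht
    rw [hget s hs, hget t ht, List.getElem?_eq_getElem hs, List.getElem?_eq_getElem ht]
    simp
  by_cases hm : w.getD i none = w.getD r none
  · rw [if_pos hm]
    refine (Nat.findGreatest_eq_iff.mpr ⟨by omega, fun _ => ⟨by omega, ?_⟩, ?_⟩).symm
    · intro t hrt hti hP
      obtain ⟨hlt, hsuf⟩ := hP
      have ht1 : 1 ≤ t := by omega
      rw [pv_ext w t (i+1) ht1 (by omega) (by omega)] at hsuf
      simp only [Nat.add_sub_cancel] at hsuf
      obtain ⟨hsuf', heq⟩ := hsuf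
      have htm : t - 1 ≤ r := hmax (t-1) (by omega) hsuf'
        ((hgeq (t-1) i (by omega) hi).mpr heq)
      omega
    · rw [pv_ext w (r+1) (i+1) (by omega) (by omega) (by omega)]
      simp only [Nat.add_sub_cancel]
      exact ⟨hb, ((hgeq r i (by omega) hi).mp hm.symm)⟩
  · rw [if_neg hm]
    have hr0 : r = 0 := by
      rcases hstop with h | h
      · exact h
      · exact absurd h.symm hm
    subst hr0
    symm
    apply Nat.findGreatest_eq_zero_iff.mpr
    intro t ht0 hti hP
    obtain ⟨hlt, hsuf⟩ := hP
    rw [pv_ext w t (i+1) (by omega) (by omega) (by omega)] at hsuf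
    simp only [Nat.add_sub_cancel] at hsuf
    obtain ⟨hsuf', heq⟩ := hsuf
    have : t - 1 ≤ 0 := hmax (t-1) (by omega) hsuf'
      ((hgeq (t-1) i (by omega) hi).mpr heq)
    have ht1 : t = 1 := by omega
    subst ht1
    exact hm ((hgeq i 0 hi (by omega)).mpr heq.symm)

lemma pv_getD_map_range (f : Nat → Nat) (k t : Nat) (h : t < k) :
    ((List.range k).map f).getD t 0 = f t := by
  simp [List.getD_eq_getElem?_getD, List.getElem?_map, List.getElem?_range h]

-- ---- the whole prefix-function loop ----

lemma pvPF_loop (w : List (Option String)) :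
    ∀ n, n + 1 ≤ w.length →
    (List.range' 1 n).foldl
      (fun st i =>
        let j0 := pvKmpFall w st.1 (w.getD i none) st.2 st.2
        let j1 := if w.getD i none = w.getD j0 none then j0 + 1 else j0
        (st.1 ++ [j1], j1)) ([0], 0)
    = ((List.range (n+1)).map (fun t => pvLB w (t+1)), pvLB w (n+1)) := by
  intro n
  induction n with
  | zero =>
    intro _
    simp [pvLB_one]
  | succ n ih =>
    intro hn
    have hi : n + 1 < w.length := by omega
    have h0 : 0 < n + 1 := by omega
    rw [List.range'_concat, List.foldl_append, ih (by omega), List.foldl_cons, List.foldl_nil]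
    have he : 1 + 1 * n = n + 1 := by omega
    rw [he]
    have hpi : ∀ t, t < n + 1 →
        ((List.range (n+1)).map (fun t => pvLB w (t+1))).getD t 0 = pvLB w (t+1) := by
      intro t ht
      exact pv_getD_map_range _ _ _ ht
    have hfall := pvFall_spec w ((List.range (n+1)).map (fun t => pvLB w (t+1))) (n+1) hi hpi
      (pvLB w (n+1)) (pvLB w (n+1)) le_rfl (pvLB_lt w h0) (pvLB_suffix w (n+1))
      (fun t ht hbt _ => pvLB_max w ht hbt)
    obtain ⟨hrlt, hrb, hrstop, hrmax⟩ := hfall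
    set r := pvKmpFall w ((List.range (n+1)).map (fun t => pvLB w (t+1)))
      (w.getD (n+1) none) (pvLB w (n+1)) (pvLB w (n+1)) with hrdef
    have hstep := pvStep_eq w (n+1) r h0 hi hrlt hrb hrstop hrmax
    simp only []
    rw [hstep, show List.range (n+1+1) = List.range (n+1) ++ [n+1] from List.range_succ,
      List.map_append]
    rfl

lemma pvPrefixFun_eq (w : List (Option String)) (hw : w ≠ []) :
    pvPrefixFun w = (List.range w.length).map (fun t => pvLB w (t+1)) := by
  have hl : 0 < w.length := List.length_pos_iff.mpr hw
  unfold pvPrefixFun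
  rw [if_neg (by omega)]
  rw [pvPF_loop w (w.length - 1) (by omega)]
  have h2 : w.length - 1 + 1 = w.length := by omega
  rw [h2]

-- ---- sentinel lemmas: borders of xs ++ [none] ++ ys never cross the sentinel ----

lemma pvSentinel_le (xs ys : List String) (s N : Nat)
    (hsN : s < N) (hN : N ≤ xs.length + 1 + ys.length)
    (hsuf : (xs.map some ++ [none] ++ ys.map some).take s <:+
            (xs.map some ++ [none] ++ ys.map some).take N) :
    s ≤ xs.length := by
  set w := xs.map some ++ [none] ++ ys.map some with hw
  have hlen : w.length = xs.length + 1 + ys.length := by simp [hw]; omega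
  by_contra hgt
  push_neg at hgt
  have hNle : N ≤ w.length := by omega
  rw [List.suffix_iff_eq_drop] at hsuf
  have hlens : (w.take s).length = s := by rw [List.length_take]; omega
  have hlenN : (w.take N).length = N := by rw [List.length_take]; omega
  rw [hlens, hlenN] at hsuf
  have hidx : (w.take s)[xs.length]? = ((w.take N).drop (N - s))[xs.length]? := by
    rw [hsuf]
  rw [List.getElem?_take] at hidx
  rw [if_pos (show xs.length < s by omega)] at hidx
  rw [List.getElem?_drop, List.getElem?_take] at hidx
  rw [if_pos (show N - s + xs.length < N by omega)] at hidx
  have hsent : w[xs.length]? = some none := by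
    rw [hw, List.getElem?_append_left (by simp),
      List.getElem?_append_right (by simp)]
    simp
  set idx := N - s + xs.length with hidxdef
  have hidx1 : xs.length + 1 ≤ idx := by omega
  have hidx2 : idx < w.length := by omega
  have hother : w[idx]? = (ys.map some)[idx - (xs.length + 1)]? := by
    rw [hw, List.getElem?_append_right (by simp; omega)]
    congr 1
    simp
  have hylt : idx - (xs.length + 1) < ys.length := by omega
  rw [hsent, hother, List.getElem?_map, List.getElem?_eq_getElem hylt] at hidx
  simp at hidx

-- the take of the joined list up to the sentinel / past it
lemma pv_take_m (xs ys : List String) :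
    (xs.map some ++ [none] ++ ys.map some).take xs.length = xs.map some := by
  rw [List.take_append, List.take_append]
  simp

lemma pv_take_mk (xs ys : List String) (k : Nat) (hk : k ≤ ys.length) :
    (xs.map some ++ [none] ++ ys.map some).take (xs.length + 1 + k)
      = xs.map some ++ [none] ++ (ys.take k).map some := by
  rw [List.take_append]
  have h1 : (xs.map some ++ [none]).take (xs.length + 1 + k) = xs.map some ++ [none] := by
    apply List.take_of_length_le
    simp
  rw [h1]
  congr 1
  rw [List.map_take]
  congr 1
  simp

-- ---- pass 1: pi[m+k] = m exactly at full occurrences of prev_tail ----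

lemma pvPass1_char (xs ys : List String) (k : Nat) (hk : k ≤ ys.length) :
    ((xs.map some ++ [none] ++ ys.map some).take xs.length <:+
     (xs.map some ++ [none] ++ ys.map some).take (xs.length + 1 + k))
    ↔ (xs.length ≤ k ∧ (ys.take k).drop (k - xs.length) = xs) := by
  rw [pv_take_m, pv_take_mk xs ys k hk]
  set m := xs.length with hm
  set X := xs.map some with hX
  set Z := X ++ [none] ++ (ys.take k).map some with hZ
  have hZlen : Z.length = m + 1 + k := by
    simp [hZ, hX, hm]
    omega
  constructor
  · intro hsuf
    rw [List.suffix_iff_eq_drop] at hsuf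
    have hXlen : X.length = m := by simp [hX, hm]
    rw [hZlen, hXlen] at hsuf
    have hmk : m ≤ k := by
      by_contra hlt
      push_neg at hlt
      have hidx : X[m - (k+1)]? = Z[(m + 1 + k - m) + (m - (k+1))]? := by
        rw [hsuf, List.getElem?_drop]
      have h2 : m + 1 + k - m + (m - (k + 1)) = m := by omega
      rw [h2] at hidx
      have hsent : Z[m]? = some none := by
        rw [hZ, List.getElem?_append_left (by simp [hX, hm]),
          List.getElem?_append_right (by simp [hX, hm])]
        simp [hm, hX]
      have hXm : X[m - (k+1)]? = some (some (xs[m - (k+1)]'(by omega))) := by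
        rw [hX, List.getElem?_map, List.getElem?_eq_getElem (by omega : m - (k+1) < xs.length)]
        rfl
      rw [hXm, hsent] at hidx
      simp at hidx
    refine ⟨hmk, ?_⟩
    have hdrop : Z.drop (m + 1 + k - m) = ((ys.take k).drop (k - m)).map some := by
      have h3 : m + 1 + k - m = (m + 1) + (k - m) := by omega
      rw [h3, hZ, List.drop_append]
      have h4 : (X ++ [none]).length = m + 1 := by simp [hX, hm]
      rw [List.drop_of_length_le (by omega : (X ++ [none]).length ≤ m + 1 + (k - m))]
      have h5 : m + 1 + (k - m) - (X ++ [none]).length = k - m := by omega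
      rw [h5]
      simp [List.map_drop]
    rw [hdrop] at hsuf
    have := (List.map_injective_iff.mpr (Option.some_injective String)) hsuf
    exact this.symm
  · rintro ⟨hmk, heq⟩
    have h1 : X = ((ys.take k).drop (k - m)).map some := by
      rw [hX, ← heq]
    rw [h1, List.map_drop]
    exact (List.drop_suffix (k - m) ((ys.take k).map some)).trans
      (List.suffix_append (X ++ [none]) _)

lemma pvPass1_pi (xs ys : List String) (k : Nat) (hk1 : 1 ≤ k) (hk : k ≤ ys.length) :
    (pvLB (xs.map some ++ [none] ++ ys.map some) (xs.length + 1 + k) = xs.length)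
    ↔ (xs.length ≤ k ∧ (ys.take k).drop (k - xs.length) = xs) := by
  rw [← pvPass1_char xs ys k hk]
  set w := xs.map some ++ [none] ++ ys.map some with hw
  constructor
  · intro h
    have hs := pvLB_suffix w (xs.length + 1 + k)
    rwa [h] at hs
  · intro h
    have hge : xs.length ≤ pvLB w (xs.length + 1 + k) :=
      pvLB_max w (by omega) h
    have hle : pvLB w (xs.length + 1 + k) ≤ xs.length := by
      apply pvSentinel_le xs ys _ _ (pvLB_lt w (by omega))
      · simp [hw]; omega
      · exact pvLB_suffix w _
    omega

-- ---- pass 2: the last prefix-function value is the longest overlap ----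

lemma pvPass2 (xs ys : List String) :
    pvLB (xs.map some ++ [none] ++ ys.map some) (xs.length + 1 + ys.length)
      = Nat.findGreatest (fun s => s ≤ ys.length ∧ xs.take s = ys.drop (ys.length - s))
          xs.length := by
  set n := xs.length with hn
  set m := ys.length with hm
  set v := xs.map some ++ [none] ++ ys.map some with hv
  have hvlen : v.length = n + 1 + m := by simp [hv, hn, hm]; omega
  have hvtake : v.take (n + 1 + m) = v := by
    apply List.take_of_length_le
    omega
  -- characterisation of borders of v
  have hchar : ∀ s, s < n + 1 + m → (v.take s <:+ v.take (n + 1 + m) ↔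
      (s ≤ n ∧ s ≤ m ∧ xs.take s = ys.drop (m - s))) := by
    intro s hs
    rw [hvtake]
    constructor
    · intro hsuf
      have hsn : s ≤ n := by
        apply pvSentinel_le xs ys s (n + 1 + m) hs (by omega)
        rw [hvtake]
        exact hsuf
      have hts : v.take s = (xs.take s).map some := by
        rw [hv, List.take_append, List.take_append]
        have e1 : s - (xs.map some).length = 0 := by simp; omega
        have e2 : s - (xs.map some ++ [none]).length = 0 := by simp; omega
        rw [e1, e2]
        simp [List.map_take]
      have hsm : s ≤ m := by
        by_contra hlt
        push_neg at hlt
        rw [List.suffix_iff_eq_drop] at hsuf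
        have hls : (v.take s).length = s := by rw [List.length_take]; omega
        rw [hls, hvlen] at hsuf
        have hidx : (v.take s)[s - m - 1]? = v[(n + 1 + m - s) + (s - m - 1)]? := by
          rw [hsuf, List.getElem?_drop]
        have h2 : n + 1 + m - s + (s - m - 1) = n := by omega
        rw [h2] at hidx
        have hsent : v[n]? = some none := by
          rw [hv, List.getElem?_append_left (by simp [hn]),
            List.getElem?_append_right (by simp [hn])]
          simp [hn]
        rw [hsent, hts, List.getElem?_map, List.getElem?_take] at hidx
        rw [if_pos (show s - m - 1 < s by omega),
          List.getElem?_eq_getElem (by omega : s - m - 1 < xs.length)] at hidx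
        simp at hidx
      refine ⟨hsn, hsm, ?_⟩
      rw [List.suffix_iff_eq_drop] at hsuf
      have hls : (v.take s).length = s := by rw [List.length_take]; omega
      rw [hls, hvlen, hts] at hsuf
      have hdrop : v.drop (n + 1 + m - s) = (ys.drop (m - s)).map some := by
        have h3 : n + 1 + m - s = (n + 1) + (m - s) := by omega
        rw [h3, hv, List.drop_append]
        have h4 : (xs.map some ++ [none]).length = n + 1 := by simp [hn]
        rw [List.drop_of_length_le (by omega : (xs.map some ++ [none]).length ≤ n + 1 + (m - s))]
        have h5 : n + 1 + (m - s) - (xs.map some ++ [none]).length = m - s := by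
          rw [h4]; omega
        rw [h5]
        simp [List.map_drop]
      rw [hdrop] at hsuf
      exact (List.map_injective_iff.mpr (Option.some_injective String)) hsuf
    · rintro ⟨hsn, hsm, heq⟩
      have hts : v.take s = (xs.take s).map some := by
        rw [hv, List.take_append, List.take_append]
        have e1 : s - (xs.map some).length = 0 := by simp; omega
        have e2 : s - (xs.map some ++ [none]).length = 0 := by simp; omega
        rw [e1, e2]
        simp [List.map_take]
      rw [hts, heq, List.map_drop]
      exact (List.drop_suffix _ _).trans (List.suffix_append (xs.map some ++ [none]) _)
  -- now identify the two findGreatest computations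
  apply Nat.findGreatest_eq_iff.mpr
  refine ⟨?_, ?_, ?_⟩
  · calc Nat.findGreatest _ n ≤ n := Nat.findGreatest_le n
      _ ≤ n + 1 + m := by omega
  · intro hne
    have hP0 : (fun s => s ≤ m ∧ xs.take s = ys.drop (m - s)) 0 := by
      simp
      omega
    have hspec := Nat.findGreatest_spec (P := fun s => s ≤ m ∧ xs.take s = ys.drop (m - s))
      (Nat.zero_le n) hP0
    set g := Nat.findGreatest (fun s => s ≤ m ∧ xs.take s = ys.drop (m - s)) n with hg
    have hgn : g ≤ n := Nat.findGreatest_le n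
    refine ⟨by omega, ?_⟩
    exact (hchar g (by omega)).mpr ⟨hgn, hspec.1, hspec.2⟩
  · intro t hgt htle hP
    obtain ⟨hlt, hsuf⟩ := hP
    obtain ⟨htn, htm, heq⟩ := (hchar t hlt).mp hsuf
    have : t ≤ Nat.findGreatest (fun s => s ≤ m ∧ xs.take s = ys.drop (m - s)) n :=
      Nat.le_findGreatest htn ⟨htm, heq⟩
    omega

-- ---- the forward keep-last scan is a findGreatest ----

lemma pvFoldLast (g : Nat → Nat) (m : Nat) :
    ∀ n, (List.range' (m+1) n).foldl (fun best j => if g j = m then j - m else best) 0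
      = Nat.findGreatest (fun k => g (m+k) = m) n := by
  intro n
  induction n with
  | zero => rfl
  | succ n ih =>
    rw [List.range'_concat, List.foldl_append, ih, List.foldl_cons, List.foldl_nil]
    have he : m + 1 + 1 * n = m + (n + 1) := by omega
    rw [he, Nat.findGreatest_succ]
    by_cases h : g (m + (n + 1)) = m
    · rw [if_pos h, if_pos h]
      omega
    · rw [if_neg h, if_neg h]

lemma pvFG_congr (P Q : Nat → Prop) [DecidablePred P] [DecidablePred Q]
    (n : Nat) (h : ∀ k, 0 < k → k ≤ n → (P k ↔ Q k)) :
    Nat.findGreatest P n = Nat.findGreatest Q n := by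
  induction n with
  | zero => rfl
  | succ n ih =>
    rw [Nat.findGreatest_succ, Nat.findGreatest_succ,
      if_congr (h (n+1) (by omega) le_rfl) rfl (ih (fun k hk hkn => h k hk (by omega)))]

-- ---- bridging pvCond to the full/truncated conditions ----

lemma pvCond_low (current prev_tail : List String) (k : Nat) (hk : k ≤ prev_tail.length) :
    (pvCond current prev_tail k = true)
    ↔ current.take k = prev_tail.drop (prev_tail.length - k) := by
  have hc : min prev_tail.length k = k := by omega
  simp [pvCond, hc]

lemma pvCond_high (current prev_tail : List String) (k : Nat) (hk : prev_tail.length ≤ k) :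
    (pvCond current prev_tail k = true)
    ↔ (current.take k).drop (k - prev_tail.length) = prev_tail := by
  have hc : min prev_tail.length k = prev_tail.length := by omega
  simp only [pvCond, hc, Nat.sub_self, List.drop_zero, decide_eq_true_eq]
  rw [List.drop_take]
  have h1 : k - (k - prev_tail.length) = prev_tail.length := by omega
  rw [h1]

-- ---- assembling both computations of the best anchor ----

lemma pvAssemble (current prev_tail : List String) :
    Nat.findGreatest (fun k => pvCond current prev_tail k = true) current.length
      = (if Nat.findGreatest (fun k => prev_tail.length ≤ k ∧
             (current.take k).drop (k - prev_tail.length) = prev_tail) current.length = 0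
         then Nat.findGreatest (fun s => s ≤ prev_tail.length ∧
             current.take s = prev_tail.drop (prev_tail.length - s)) current.length
         else Nat.findGreatest (fun k => prev_tail.length ≤ k ∧
             (current.take k).drop (k - prev_tail.length) = prev_tail) current.length) := by
  set m := prev_tail.length with hm
  set n := current.length with hn
  set f := Nat.findGreatest (fun k => m ≤ k ∧
    (current.take k).drop (k - m) = prev_tail) n with hf
  have hfprops := Nat.findGreatest_eq_iff.mp hf.symm
  by_cases hf0 : f = 0
  · rw [if_pos hf0]
    set g := Nat.findGreatest (fun s => s ≤ m ∧
      current.take s = prev_tail.drop (m - s)) n with hg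
    have hgprops := Nat.findGreatest_eq_iff.mp hg.symm
    have hnofull : ∀ t, 0 < t → t ≤ n → ¬ (m ≤ t ∧ (current.take t).drop (t - m) = prev_tail) := by
      rw [hf] at hf0
      exact fun t ht htn => Nat.findGreatest_eq_zero_iff.mp hf0 ht htn
    apply Nat.findGreatest_eq_iff.mpr
    refine ⟨hgprops.1, ?_, ?_⟩
    · intro hne
      obtain ⟨hgm, hgeq⟩ := hgprops.2.1 hne
      exact (pvCond_low current prev_tail g hgm).mpr hgeq
    · intro t hgt htn hcond
      rcases Nat.lt_or_ge m t with htm | htm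
      · have := (pvCond_high current prev_tail t (by omega)).mp hcond
        exact hnofull t (by omega) htn ⟨by omega, this⟩
      · have := (pvCond_low current prev_tail t htm).mp hcond
        exact hgprops.2.2 hgt htn ⟨htm, this⟩
  · rw [if_neg hf0]
    obtain ⟨hfm, hfeq⟩ := hfprops.2.1 hf0
    apply Nat.findGreatest_eq_iff.mpr
    refine ⟨hfprops.1, ?_, ?_⟩
    · intro _
      exact (pvCond_high current prev_tail f hfm).mpr hfeq
    · intro t hft htn hcond
      rcases Nat.lt_or_ge m t with htm | htm
      · have := (pvCond_high current prev_tail t (by omega)).mp hcond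
        exact hfprops.2.2 hft htn ⟨by omega, this⟩
      · omega

-- ---- evaluating port B ----

lemma pvB_eq (current prev_tail : List String) (hpt : prev_tail ≠ []) :
    find_new_lines_py_alt current prev_tail = current.drop
      (if Nat.findGreatest (fun k => prev_tail.length ≤ k ∧
            (current.take k).drop (k - prev_tail.length) = prev_tail) current.length = 0
       then Nat.findGreatest (fun s => s ≤ prev_tail.length ∧
            current.take s = prev_tail.drop (prev_tail.length - s)) current.length
       else Nat.findGreatest (fun k => prev_tail.length ≤ k ∧
            (current.take k).drop (k - prev_tail.length) = prev_tail) current.length) := by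
  set m := prev_tail.length with hm
  set n := current.length with hn
  have hm1 : 1 ≤ m := by
    rw [hm]
    exact List.length_pos_iff.mpr hpt
  set w := prev_tail.map some ++ [none] ++ current.map some with hw
  have hwlen : w.length = m + 1 + n := by simp [hw, hm, hn]; omega
  have hwne : w ≠ [] := List.length_pos_iff.mp (by omega)
  set v := current.map some ++ [none] ++ prev_tail.map some with hv
  have hvlen : v.length = n + 1 + m := by simp [hv, hm, hn]; omega
  have hvne : v ≠ [] := List.length_pos_iff.mp (by omega)
  unfold find_new_lines_py_alt
  rw [if_neg hpt]
  simp only [← hm, ← hw, ← hv]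
  rw [hwlen]
  have hsub : m + 1 + n - (m + 1) = n := by omega
  rw [hsub]
  rw [pvFoldLast (fun j => (pvPrefixFun w).getD j 0) m n]
  have hfg1 : Nat.findGreatest (fun k => (pvPrefixFun w).getD (m + k) 0 = m) n
      = Nat.findGreatest (fun k => m ≤ k ∧
          (current.take k).drop (k - m) = prev_tail) n := by
    apply pvFG_congr
    intro k hk0 hkn
    rw [pvPrefixFun_eq w hwne, hwlen, pv_getD_map_range _ _ _ (by omega)]
    have harit : m + k + 1 = m + 1 + k := by omega
    rw [harit, hw, hm]
    exact pvPass1_pi prev_tail current k hk0 (by rw [← hn]; exact hkn)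
  rw [hfg1]
  have hfg2 : (pvPrefixFun v).getD (v.length - 1) 0
      = Nat.findGreatest (fun s => s ≤ m ∧
          current.take s = prev_tail.drop (m - s)) n := by
    rw [pvPrefixFun_eq v hvne, hvlen]
    have hidx : n + 1 + m - 1 < n + 1 + m := by omega
    rw [pv_getD_map_range _ _ _ hidx]
    have harit : n + 1 + m - 1 + 1 = n + 1 + m := by omega
    rw [harit, hv, hm, hn]
    exact pvPass2 current prev_tail
  rw [hfg2]
  by_cases hz : Nat.findGreatest (fun k => m ≤ k ∧
      (current.take k).drop (k - m) = prev_tail) n = 0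
  · rw [if_pos hz]
    rw [PySem.List.slice_from_natCast]
  · rw [if_neg hz]
    rw [PySem.List.slice_from_natCast]

-- ===== VERDICT (by name: the statement is the Claim_ definition above) =====
theorem find_new_lines_py_spec : Claim_equal_find_new_lines_py := by
  intro current prev_tail _
  unfold Spec_find_new_lines_py
  by_cases hpt : prev_tail = []
  · unfold find_new_lines_py find_new_lines_py_alt
    simp [hpt]
  · unfold find_new_lines_py
    rw [if_neg hpt]
    rw [pv_loopA current prev_tail hpt current.length le_rfl]
    rw [pvBest_eq_FG, pvAssemble, ← pvB_eq current prev_tail hpt]
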